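-- pv_equiv track=rewrite | github.com/laivii/TIRA2023 | Viikko 4/fliptwo.py | solve
-- ===== SOURCE A (Python) =====
-- import collections
--
-- def solve(n,k):
--     list = collections.deque([])
--
--     for i in range(1,n+1):
--         list.append(i)
--
--     for j in range(k):
--         list.append(list[1])
--         list.append(list[0])
--         list.popleft()
--         list.popleft()
--
--     newFirst = list[0]
--
--     return newFirst
-- ===== SOURCE B (Python) =====
-- def solve(n, k):
--     # Each operation moves the front two elements to the back, swapped.
--     # Positions therefore follow one fixed cycle through position 0:
--     # even positions 0,2,4,... then (for even n) odd positions 1,3,...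
--     # The cycle containing position 0 has length n (n even) or (n+1)//2 (n odd),
--     # so the answer is a closed form of k modulo that cycle length.
--     if k <= 0:
--         return 1
--     L = n if n % 2 == 0 else (n + 1) // 2
--     r = k % L
--     return 2 * r + 1 if 2 * r < n else 2 * r - n + 2
-- ===== Notes on version B (the rewrite author's own statement) =====
-- stated objective: faster
-- what changed: Instead of simulating k deque operations (each moving the swapped front pair to the back), B observes that positions follow one fixed cycle through position 0 of length n (n even) or (n+1)//2 (n odd), reduces k modulo that length and returns the front element by a closed-form expression.
import Mathlib
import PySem

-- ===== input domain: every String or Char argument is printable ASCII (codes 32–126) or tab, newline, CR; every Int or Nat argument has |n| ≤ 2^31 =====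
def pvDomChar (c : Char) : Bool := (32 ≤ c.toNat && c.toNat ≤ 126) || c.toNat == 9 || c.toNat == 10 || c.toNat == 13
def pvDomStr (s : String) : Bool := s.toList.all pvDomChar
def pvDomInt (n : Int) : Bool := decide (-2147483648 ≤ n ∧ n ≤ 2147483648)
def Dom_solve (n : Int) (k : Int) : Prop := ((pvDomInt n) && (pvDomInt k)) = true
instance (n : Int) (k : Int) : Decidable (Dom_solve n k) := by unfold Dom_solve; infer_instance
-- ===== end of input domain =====

-- B replaces the O(n+k) deque simulation by an O(1) closed form: k reduced modulo the
-- length of the position cycle through position 0 (n if n is even, (n+1)//2 if n is odd).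

-- ===== PORT A =====
-- collections.deque, ported as the classic two-list functional deque
-- (front list ++ reversed back list); append/popleft are amortized O(1), as in Python.
def dqPopleft (F B : List Int) : Option (List Int × List Int) :=
  match F with
  | _ :: f => some (f, B)
  | [] =>
    match B.reverse with
    | _ :: f => some (f, [])
    | [] => none

def dqGet (F B : List Int) (i : Int) : Option Int :=
  if 0 ≤ i ∧ i < (F.length : Int) then F[i.toNat]?
  else PySem.List.pyGet? (F ++ B.reverse) i

-- one iteration of A's loop body: append list[1], append list[0], popleft, popleft
def stepC (d : List Int × List Int) : Option (List Int × List Int) :=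
  (dqGet d.1 d.2 1).bind fun a =>
    let d1 : List Int × List Int := (d.1, a :: d.2)
    (dqGet d1.1 d1.2 0).bind fun b =>
      let d2 : List Int × List Int := (d1.1, b :: d1.2)
      (dqPopleft d2.1 d2.2).bind fun d3 => dqPopleft d3.1 d3.2

def solve (n : Int) (k : Int) : Int :=
  let init : List Int × List Int :=
    (PySem.List.pyRange 1 (n + 1) 1).foldl (fun d i => (d.1, i :: d.2)) ([], [])
  let fin : Option (List Int × List Int) :=
    (PySem.List.pyRange 0 k 1).foldl (fun s _ => s.bind stepC) (some init)
  ((fin.bind fun d => dqGet d.1 d.2 0).getD 0)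

-- ===== PORT B =====
def solve_alt (n : Int) (k : Int) : Int :=
  if k ≤ 0 then 1
  else
    let L : Int := if PySem.Int.mod n 2 = 0 then n else PySem.Int.floordiv (n + 1) 2
    let r : Int := PySem.Int.mod k L
    if 2 * r < n then 2 * r + 1 else 2 * r - n + 2

-- ===== PRECONDITION & SPEC =====
-- Pre_ excludes exactly the inputs where A raises IndexError: an empty deque (n ≤ 0)
-- or a one-element deque entering the flip loop (n = 1 with k ≥ 1).
def Pre_solve (n : Int) (k : Int) : Prop := 2 ≤ n ∨ (1 ≤ n ∧ k ≤ 0)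
instance (n : Int) (k : Int) : Decidable (Pre_solve n k) := by unfold Pre_solve; infer_instance

def pvWitness_solve : Int × Int := (5, 7)

def Spec_solve (n : Int) (k : Int) (out : Int) : Prop := out = solve_alt n k
instance (n : Int) (k : Int) (out : Int) : Decidable (Spec_solve n k out) := by
  unfold Spec_solve; infer_instance

-- ===== CLAIM (what is proved, stated in full; the proofs are below) =====
def Claim_equal_solve : Prop :=
  ∀ (n : Int) (k : Int), Dom_solve n k → Pre_solve n k → Spec_solve n k (solve n k)

-- ===== LEMMAS AND PROOFS =====

-- the abstract (plain-list) view of the deque: front ++ reverse back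
def absD (d : List Int × List Int) : List Int := d.1 ++ d.2.reverse

def popleftA (l : List Int) : Option (List Int) :=
  match l with
  | [] => none
  | _ :: xs => some xs

-- the abstract one-step transformation stepC implements
def stepA (l : List Int) : Option (List Int) :=
  (PySem.List.pyGet? l 1).bind fun a =>
    let l1 := l ++ [a]
    (PySem.List.pyGet? l1 0).bind fun b =>
      let l2 := l1 ++ [b]
      (popleftA l2).bind fun l3 => popleftA l3

lemma dqGet_abs (F B : List Int) (i : Int) :
    dqGet F B i = PySem.List.pyGet? (F ++ B.reverse) i := by
  unfold dqGet
  split_ifs with h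
  · rw [PySem.List.pyGet?_of_nonneg (F ++ B.reverse) h.1,
      List.getElem?_append_left (by omega : i.toNat < F.length)]
  · rfl

lemma dqPopleft_abs (F B : List Int) :
    Option.map absD (dqPopleft F B) = popleftA (absD (F, B)) := by
  cases F with
  | cons x f => simp [dqPopleft, popleftA, absD]
  | nil =>
    unfold dqPopleft
    cases hB : B.reverse with
    | nil => simp [popleftA, absD, hB]
    | cons x f => simp [popleftA, absD, hB]

lemma absD_push (F B : List Int) (x : Int) :
    absD (F, x :: B) = absD (F, B) ++ [x] := by
  simp [absD]

lemma stepC_abs (d : List Int × List Int) :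
    Option.map absD (stepC d) = stepA (absD d) := by
  unfold stepC stepA
  rw [dqGet_abs]
  have h1 : d.1 ++ d.2.reverse = absD d := rfl
  rw [h1]
  cases hg1 : PySem.List.pyGet? (absD d) 1 with
  | none => rfl
  | some a =>
    simp only [Option.bind_some]
    rw [dqGet_abs]
    have h2 : d.1 ++ (a :: d.2).reverse = absD d ++ [a] := by simp [absD]
    rw [h2]
    cases hg2 : PySem.List.pyGet? (absD d ++ [a]) 0 with
    | none => rfl
    | some b =>
      simp only [Option.bind_some]
      have h3 : absD (d.1, b :: a :: d.2) = absD d ++ [a] ++ [b] := by simp [absD]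
      cases hp1 : dqPopleft d.1 (b :: a :: d.2) with
      | none =>
        have := dqPopleft_abs d.1 (b :: a :: d.2)
        rw [hp1] at this
        simp only [Option.map_none] at this
        rw [h3] at this
        rw [← this]
        rfl
      | some d3 =>
        have := dqPopleft_abs d.1 (b :: a :: d.2)
        rw [hp1] at this
        simp only [Option.map_some] at this
        rw [h3] at this
        rw [← this]
        simp only [Option.bind_some]
        have := dqPopleft_abs d3.1 d3.2
        simpa using this

lemma foldl_stepC_abs (xs : List Int) (s : Option (List Int × List Int)) :
    Option.map absD (xs.foldl (fun s _ => s.bind stepC) s)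
      = xs.foldl (fun s _ => s.bind stepA) (Option.map absD s) := by
  induction xs generalizing s with
  | nil => rfl
  | cons x t ih =>
    simp only [List.foldl]
    rw [ih]
    congr 1
    cases s with
    | none => rfl
    | some d => simpa using stepC_abs d

lemma foldl_push_abs (xs : List Int) (d : List Int × List Int) :
    absD (xs.foldl (fun d i => (d.1, i :: d.2)) d) = absD d ++ xs := by
  induction xs generalizing d with
  | nil => simp
  | cons x t ih =>
    simp only [List.foldl]
    rw [ih, absD_push]
    simp

lemma bind_dqGet_eq (o : Option (List Int × List Int)) :
    (o.bind fun d => dqGet d.1 d.2 0)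
      = (Option.map absD o).bind fun l => PySem.List.pyGet? l 0 := by
  cases o with
  | none => rfl
  | some d =>
    simp only [Option.map_some, Option.bind_some]
    rw [dqGet_abs]
    rfl


-- the one-step position map: the element at position i after an operation sat at h N i before it
def hmap (N : Nat) (i : Nat) : Nat :=
  if i < N - 2 then i + 2 else if i = N - 2 then 1 else 0

-- the position reached from 0 after r < Lcyc N steps of hmap
def posc (N : Nat) (r : Nat) : Nat := if 2 * r < N then 2 * r else 2 * r - N + 1

-- length of the hmap-cycle through position 0
def Lcyc (N : Nat) : Nat := if N % 2 = 0 then N else (N + 1) / 2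

lemma Lcyc_pos (N : Nat) (hN : 2 ≤ N) : 0 < Lcyc N := by
  unfold Lcyc; split_ifs <;> omega

lemma foldl_bind_eq_iterate (xs : List Int) (s : Option (List Int)) :
    xs.foldl (fun s _ => s.bind stepA) s = (fun o => Option.bind o stepA)^[xs.length] s := by
  induction xs generalizing s with
  | nil => simp
  | cons x t ih => simp [List.foldl, ih, Function.iterate_succ_apply]

lemma stepA_map (N : Nat) (hN : 2 ≤ N) (F : Nat → Int) :
    stepA ((List.range N).map F) = some ((List.range N).map (F ∘ hmap N)) := by
  obtain ⟨m, rfl⟩ : ∃ m, N = m + 2 := ⟨N - 2, by omega⟩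
  have hl : (List.range (m + 2)).map F
      = F 0 :: F 1 :: (List.range m).map (fun i => F (i + 2)) := by
    rw [List.range_succ_eq_map, List.range_succ_eq_map]
    simp [List.map_map, Function.comp]
  have hget1 : PySem.List.pyGet? (F 0 :: F 1 :: (List.range m).map (fun i => F (i + 2))) 1
      = some (F 1) := by
    have := PySem.List.pyGet?_cons_succ (x := F 0)
      (xs := F 1 :: (List.range m).map (fun i => F (i + 2))) (n := 0)
    simp only [Nat.cast_zero, zero_add, PySem.List.pyGet?_zero_cons] at this
    exact this
  unfold stepA
  rw [hl, hget1]
  simp only [Option.bind, List.cons_append, PySem.List.pyGet?_zero_cons, popleftA]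
  congr 1
  -- both sides are the state after one operation; compare over range (m+2) split at the back
  rw [show m + 2 = (m + 1) + 1 from rfl, List.range_succ, List.range_succ,
    List.map_append, List.map_append]
  have hm : ∀ i ∈ List.range m, (F ∘ hmap (m + 2)) i = F (i + 2) := by
    intro i hi
    have : i < m := List.mem_range.mp hi
    simp only [Function.comp, hmap]
    rw [if_pos (by omega)]
  rw [List.map_congr_left hm]
  refine ?_
  have h1 : (F ∘ hmap (m + 2)) m = F 1 := by
    simp only [Function.comp, hmap]
    rw [if_neg (by omega), if_pos (by omega)]
  have h2 : (F ∘ hmap (m + 2)) (m + 1) = F 0 := by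
    simp only [Function.comp, hmap]
    rw [if_neg (by omega), if_neg (by omega)]
  simp
  exact ⟨h1.symm, h2.symm⟩

lemma iterate_stepA_map (N : Nat) (hN : 2 ≤ N) (F : Nat → Int) (K : Nat) :
    (fun o => Option.bind o stepA)^[K] (some ((List.range N).map F))
      = some ((List.range N).map (F ∘ (hmap N)^[K])) := by
  induction K generalizing F with
  | zero => simp
  | succ K ih =>
    have hb : Option.bind (some ((List.range N).map F)) stepA
        = some ((List.range N).map (F ∘ hmap N)) := stepA_map N hN F
    rw [Function.iterate_succ_apply, hb, ih]
    congr 1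
    apply List.map_congr_left
    intro i _
    simp only [Function.comp_apply]
    rw [show hmap N ((hmap N)^[K] i) = (hmap N)^[K + 1] i from
        (Function.iterate_succ_apply' (hmap N) K i).symm]

lemma hmap_posc (N : Nat) (hN : 2 ≤ N) (r : Nat) (hr : r < Lcyc N) :
    hmap N (posc N r) = posc N ((r + 1) % Lcyc N) := by
  rcases eq_or_lt_of_le (by omega : r + 1 ≤ Lcyc N) with hL | hL
  · have hz : (r + 1) % Lcyc N = 0 := by rw [hL]; exact Nat.mod_self _
    rw [hz]
    unfold Lcyc at hL
    unfold hmap posc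
    split_ifs at * <;> omega
  · have he : (r + 1) % Lcyc N = r + 1 := Nat.mod_eq_of_lt hL
    rw [he]
    unfold Lcyc at hL hr
    unfold hmap posc
    split_ifs at * <;> omega

lemma iterate_hmap_zero (N : Nat) (hN : 2 ≤ N) (K : Nat) :
    (hmap N)^[K] 0 = posc N (K % Lcyc N) := by
  induction K with
  | zero =>
    have : 0 % Lcyc N = 0 := Nat.zero_mod _
    rw [Function.iterate_zero_apply, this]
    unfold posc
    rw [if_pos (by omega)]
  | succ K ih =>
    rw [Function.iterate_succ_apply', ih]
    have hlt : K % Lcyc N < Lcyc N := Nat.mod_lt _ (Lcyc_pos N hN)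
    rw [hmap_posc N hN _ hlt]
    congr 1
    conv_rhs => rw [Nat.add_mod]
    rw [Nat.add_mod (K % Lcyc N) 1, Nat.mod_mod_of_dvd _ dvd_rfl]

lemma pyGet?_map_range_zero (F : Nat → Int) (N : Nat) (hN : 1 ≤ N) :
    PySem.List.pyGet? ((List.range N).map F) 0 = some (F 0) := by
  obtain ⟨m, rfl⟩ : ∃ m, N = m + 1 := ⟨N - 1, by omega⟩
  rw [List.range_succ_eq_map, List.map_cons, PySem.List.pyGet?_zero_cons]

lemma pyRange_len_toNat (k : Int) : (PySem.List.pyRange 0 k 1).length = k.toNat := by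
  rw [PySem.List.length_pyRange_one]
  omega

lemma solve_closed (N K : Nat) (hN : 2 ≤ N) :
    solve (N : Int) (K : Int) = 1 + (posc N (K % Lcyc N) : Int) := by
  simp only [solve]
  rw [bind_dqGet_eq, foldl_stepC_abs, Option.map_some]
  have hinit : absD ((PySem.List.pyRange 1 ((N : Int) + 1) 1).foldl
      (fun d i => (d.1, i :: d.2)) ([], [])) = PySem.List.pyRange 1 ((N : Int) + 1) 1 := by
    rw [foldl_push_abs]
    simp [absD]
  rw [hinit]
  have hr : PySem.List.pyRange 1 ((N : Int) + 1) 1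
      = (List.range N).map (fun i : Nat => (1 : Int) + i) := by
    have h1 : ((N : Int) + 1 - 1).toNat = N := by omega
    rw [PySem.List.pyRange_one, h1]
  rw [hr, foldl_bind_eq_iterate, pyRange_len_toNat, Int.toNat_natCast,
    iterate_stepA_map N hN _ K,
    show Option.bind (some ((List.range N).map ((fun i : Nat => (1 : Int) + i) ∘ (hmap N)^[K])))
        (fun l => PySem.List.pyGet? l 0)
      = PySem.List.pyGet? ((List.range N).map ((fun i : Nat => (1 : Int) + i) ∘ (hmap N)^[K])) 0
      from rfl,
    pyGet?_map_range_zero _ N (by omega), Option.getD_some]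
  simp only [Function.comp_apply]
  rw [iterate_hmap_zero N hN K]

lemma solve_alt_closed (N K : Nat) (hN : 2 ≤ N) (hK : 1 ≤ K) :
    solve_alt (N : Int) (K : Int) = 1 + (posc N (K % Lcyc N) : Int) := by
  simp only [solve_alt]
  rw [if_neg (by exact_mod_cast by omega : ¬ (K : Int) ≤ 0)]
  have hL : (if PySem.Int.mod (N : Int) 2 = 0 then (N : Int)
      else PySem.Int.floordiv ((N : Int) + 1) 2) = (Lcyc N : Int) := by
    rw [PySem.Int.mod_eq_emod_of_pos (by norm_num),
      PySem.Int.floordiv_eq_ediv_of_pos (by norm_num)]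
    unfold Lcyc
    split_ifs with h1 h2 h3 <;> omega
  rw [hL]
  have hLpos : (0 : Int) < (Lcyc N : Int) := by exact_mod_cast Lcyc_pos N hN
  rw [PySem.Int.mod_eq_emod_of_pos hLpos]
  have hrm : (K : Int) % (Lcyc N : Int) = ((K % Lcyc N : Nat) : Int) := by
    omega
  rw [hrm]
  unfold posc
  split_ifs with h1 h2 h3 <;> omega

-- ===== VERDICT (by name: the statement is the Claim_ definition above) =====
theorem solve_spec : Claim_equal_solve := by
  intro n k _ hpre
  unfold Spec_solve
  rcases le_or_gt k 0 with hk | hk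
  · -- k ≤ 0: the flip loop never runs; both return the first element 1
    have hn1 : 1 ≤ n := by rcases hpre with h | h <;> omega
    have : solve n k = 1 := by
      simp only [solve]
      rw [PySem.List.pyRange_one_eq_nil (show k ≤ 0 from hk), List.foldl_nil,
        bind_dqGet_eq, Option.map_some]
      have hinit : absD ((PySem.List.pyRange 1 (n + 1) 1).foldl
          (fun d i => (d.1, i :: d.2)) ([], [])) = PySem.List.pyRange 1 (n + 1) 1 := by
        rw [foldl_push_abs]
        simp [absD]
      rw [hinit]
      have hr : PySem.List.pyRange 1 (n + 1) 1
          = (List.range n.toNat).map (fun i : Nat => (1 : Int) + i) := by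
        have h1 : (n + 1 - 1).toNat = n.toNat := by omega
        rw [PySem.List.pyRange_one, h1]
      rw [hr]
      rw [show Option.bind (some ((List.range n.toNat).map (fun i : Nat => (1 : Int) + i)))
            (fun l => PySem.List.pyGet? l 0)
          = PySem.List.pyGet? ((List.range n.toNat).map (fun i : Nat => (1 : Int) + i)) 0
          from rfl]
      rw [pyGet?_map_range_zero _ n.toNat (by omega), Option.getD_some]
      norm_num
    rw [this]
    simp only [solve_alt]
    rw [if_pos hk]
  · -- k ≥ 1: A raises unless n ≥ 2, so Pre gives 2 ≤ n
    have hn2 : 2 ≤ n := by rcases hpre with h | h <;> omega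
    have hn : n = ((n.toNat : Nat) : Int) := by omega
    have hkk : k = ((k.toNat : Nat) : Int) := by omega
    rw [hn, hkk, solve_closed n.toNat k.toNat (by omega),
      solve_alt_closed n.toNat k.toNat (by omega) (by omega)]
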